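-- pv_equiv track=rewrite | github.com/altoid/hackerrank | common-child/cchild.py | helper
-- ===== SOURCE A (Python) =====
-- def helper(chars, hash):
--     tuples = [(chars[0], x) for x in hash[chars[0]]]
-- #    print tuples
--     if len(chars) == 1:
--         l = [[t] for t in tuples]
-- #        print l
--         return l
--
--     # stick each tuple in to each list returned by the recursive call
--     prior = helper(chars[1:], hash)
-- #    print prior
--
--     result = []
--     for t in tuples:
--         for p in prior:
--             cp = list(p)
--             cp.append(t)
--             result.append(cp)
-- #    print result
--     return result
-- ===== SOURCE B (Python) =====
-- def helper(chars, hash):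
--     result = [[]]
--     for c in chars:
--         result = [[(c, x)] + combo for combo in result for x in hash[c]]
--     return result
-- ===== Notes on version B (the rewrite author's own statement) =====
-- stated objective: simpler
-- what changed: Replaced A's suffix recursion (recursive call on chars[1:] plus nested loops appending the head tuple after each recursive list) by a single left-to-right fold that prepends each character's (char, index) choice to every partial combination.
import Mathlib
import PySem

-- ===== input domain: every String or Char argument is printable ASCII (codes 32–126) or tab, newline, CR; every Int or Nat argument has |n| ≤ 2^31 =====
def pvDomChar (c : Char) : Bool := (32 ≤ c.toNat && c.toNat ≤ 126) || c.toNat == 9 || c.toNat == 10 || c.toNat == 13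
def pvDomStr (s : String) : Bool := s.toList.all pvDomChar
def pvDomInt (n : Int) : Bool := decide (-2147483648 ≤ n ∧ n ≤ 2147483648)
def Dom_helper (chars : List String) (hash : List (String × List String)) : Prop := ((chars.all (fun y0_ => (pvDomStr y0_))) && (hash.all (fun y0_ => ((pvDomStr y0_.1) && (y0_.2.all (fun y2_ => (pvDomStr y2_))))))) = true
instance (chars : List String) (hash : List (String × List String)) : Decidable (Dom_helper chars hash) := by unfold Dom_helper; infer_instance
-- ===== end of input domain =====

-- B replaces A's suffix recursion (append each head tuple after every recursive list)
-- by a single left-to-right fold that prepends each character's choice to every partial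
-- combination; objective: simpler (no recursion, one comprehension per character).

-- ===== PORT A =====
-- the (char, index) pair of A is a 2-element list of strings here
def pvCol (hash : List (String × List String)) (c : String) : List (List String) :=
  (((PySem.Dict.mk hash).get? c).getD []).map (fun x => [c, x])

def helper (chars : List String) (hash : List (String × List String)) : List (List (List String)) :=
  match chars with
  | [] => []   -- Python raises IndexError here (chars[0]); excluded by Pre_helper
  | c :: rest =>
    let tuples := pvCol hash c
    if rest = [] then
      tuples.map (fun t => [t])
    else
      let prior := helper rest hash
      tuples.foldl (fun result t => prior.foldl (fun r p => r ++ [p ++ [t]]) result) []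

-- ===== PORT B =====
def helper_alt (chars : List String) (hash : List (String × List String)) : List (List (List String)) :=
  chars.foldl
    (fun result c => result.flatMap (fun combo => (pvCol hash c).map (fun t => t :: combo)))
    [[]]

-- ===== PRECONDITION & SPEC =====
-- Pre_ excludes exactly the inputs where Python A raises: empty chars (IndexError on
-- chars[0]) and any char missing from hash (KeyError).
def Pre_helper (chars : List String) (hash : List (String × List String)) : Prop :=
  chars ≠ [] ∧ ∀ c ∈ chars, ((PySem.Dict.mk hash).get? c).isSome
instance (chars : List String) (hash : List (String × List String)) : Decidable (Pre_helper chars hash) := by unfold Pre_helper; infer_instance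

def pvWitness_helper : List String × (List (String × List String)) :=
  (["a", "b"], [("a", ["0", "2"]), ("b", ["1"])])

def Spec_helper (chars : List String) (hash : List (String × List String)) (out : List (List (List String))) : Prop := out = helper_alt chars hash
instance (chars : List String) (hash : List (String × List String)) (out : List (List (List String))) : Decidable (Spec_helper chars hash out) := by unfold Spec_helper; infer_instance

-- ===== CLAIM (what is proved, stated in full; the proofs are below) =====
def Claim_equal_helper : Prop := ∀ (chars : List String) (hash : List (String × List String)), Dom_helper chars hash → Pre_helper chars hash → Spec_helper chars hash (helper chars hash)

-- ===== LEMMAS AND PROOFS =====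

-- the common mathematical value: right-nested product with reversed per-list layout
def pvProd (hash : List (String × List String)) : List String → List (List (List String))
  | [] => [[]]
  | c :: rest => (pvCol hash c).flatMap (fun t => (pvProd hash rest).map (fun p => p ++ [t]))

theorem foldl_snoc {α β : Type} (f : α → β) (prior : List α) (init : List β) :
    prior.foldl (fun r p => r ++ [f p]) init = init ++ prior.map f := by
  induction prior generalizing init with
  | nil => simp
  | cons p ps ih => simp [List.foldl_cons, ih]

theorem map_singleton_flat {α : Type} (l : List α) :
    l.map (fun t => [t]) = l.flatMap (fun t => [[t]]) := by
  induction l with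
  | nil => rfl
  | cons x xs ih => simp [ih]

theorem foldl_flat {α : Type} (tuples : List α) (prior : List (List α)) (init : List (List α)) :
    tuples.foldl (fun result t => prior.foldl (fun r p => r ++ [p ++ [t]]) result) init
      = init ++ tuples.flatMap (fun t => prior.map (fun p => p ++ [t])) := by
  induction tuples generalizing init with
  | nil => simp
  | cons t ts ih =>
    rw [List.foldl_cons, foldl_snoc, ih, List.flatMap_cons, List.append_assoc]

theorem helper_eq_prod (chars : List String) (hash : List (String × List String))
    (h : chars ≠ []) : helper chars hash = pvProd hash chars := by
  induction chars with
  | nil => exact absurd rfl h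
  | cons c rest ih =>
    by_cases hr : rest = []
    · subst hr
      simp [helper, pvProd, map_singleton_flat]
    · rw [show helper (c :: rest) hash
            = (pvCol hash c).foldl
                (fun result t => (helper rest hash).foldl (fun r p => r ++ [p ++ [t]]) result) []
          from by simp [helper, if_neg hr], ih hr, foldl_flat, List.nil_append, pvProd]

theorem helper_alt_inv (hash : List (String × List String)) (chars : List String)
    (acc : List (List (List String))) :
    chars.foldl
      (fun result c => result.flatMap (fun combo => (pvCol hash c).map (fun t => t :: combo)))
      acc
      = acc.flatMap (fun combo => (pvProd hash chars).map (fun p => p ++ combo)) := by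
  induction chars generalizing acc with
  | nil => simp [pvProd]
  | cons c rest ih =>
    rw [List.foldl_cons, ih]
    simp only [pvProd, List.flatMap_assoc, List.flatMap_map, List.map_flatMap, List.map_map]
    congr 1
    funext combo
    congr 1
    funext t
    congr 1
    funext p
    simp

theorem helper_alt_eq_prod (chars : List String) (hash : List (String × List String)) :
    helper_alt chars hash = pvProd hash chars := by
  simp [helper_alt, helper_alt_inv]

-- ===== VERDICT (by name: the statement is the Claim_ definition above) =====
theorem helper_spec : Claim_equal_helper := by
  intro chars hash _ hpre
  unfold Spec_helper
  rw [helper_eq_prod chars hash hpre.1, helper_alt_eq_prod]
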